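-- pv_equiv track=rewrite | github.com/pypi-data/pypi-mirror-392 | packages/mcp-fuzzer/mcp_fuzzer-0.2.4-py3-none-any.whl/mcp_fuzzer/reports/output_protocol.py | _calculate_error_severity
-- ===== SOURCE A (Python) =====
-- from typing import Any
--
-- def _calculate_error_severity(errors: list[dict[str, Any]]) -> str:
--     """Calculate overall error severity."""
--     if not errors:
--         return "none"
--
--     severities = [e.get("severity", "low") for e in errors]
--     if "critical" in severities:
--         return "critical"
--     elif "high" in severities:
--         return "high"
--     elif "medium" in severities:
--         return "medium"
--     else:
--         return "low"
-- ===== SOURCE B (Python) =====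
-- _RANK = {"critical": 3, "high": 2, "medium": 1}
-- _NAMES = ["low", "medium", "high", "critical"]
--
-- def _calculate_error_severity(errors: list) -> str:
--     """Calculate overall error severity (single accumulating pass)."""
--     if not errors:
--         return "none"
--     m = 0
--     for e in errors:
--         m = max(m, _RANK.get(e.get("severity", "low"), 0))
--     return _NAMES[m]
-- ===== Notes on version B (the rewrite author's own statement) =====
-- stated objective: alternative
-- what changed: Replaces building a severities list plus ordered membership tests with a single accumulating pass keeping the maximum numeric rank, translated back to its name by a table at the end.
import Mathlib
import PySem

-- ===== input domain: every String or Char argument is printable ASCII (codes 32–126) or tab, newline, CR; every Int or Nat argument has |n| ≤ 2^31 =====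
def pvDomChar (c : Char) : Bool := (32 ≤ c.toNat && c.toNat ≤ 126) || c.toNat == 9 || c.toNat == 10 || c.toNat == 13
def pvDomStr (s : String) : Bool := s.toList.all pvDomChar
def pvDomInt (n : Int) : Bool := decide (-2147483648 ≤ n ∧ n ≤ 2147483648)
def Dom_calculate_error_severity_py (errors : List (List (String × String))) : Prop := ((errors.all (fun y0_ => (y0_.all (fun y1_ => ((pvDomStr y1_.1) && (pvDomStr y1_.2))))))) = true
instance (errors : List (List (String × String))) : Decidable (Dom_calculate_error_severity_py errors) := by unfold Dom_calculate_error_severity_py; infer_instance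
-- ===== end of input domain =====

-- ===== PORT A =====
-- B is an alternative decomposition (single accumulating max-rank pass); equivalence of return values.
-- e.get("severity", "low")
def pvSev (e : List (String × String)) : String :=
  PySem.Dict.getD (PySem.Dict.mk e) "severity" "low"

def calculate_error_severity_py (errors : List (List (String × String))) : String :=
  if errors = [] then "none"
  else
    let severities := errors.map (fun e => pvSev e)
    if severities.contains "critical" then "critical"
    else if severities.contains "high" then "high"
    else if severities.contains "medium" then "medium"
    else "low"

-- ===== PORT B =====
-- _RANK.get(s, 0)
def pvRank (s : String) : Nat :=
  PySem.Dict.getD (PySem.Dict.mk [("critical", 3), ("high", 2), ("medium", 1)]) s 0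

-- _NAMES[m]; the accumulated m is always ≤ 3, so the index is in range
def calculate_error_severity_py_alt (errors : List (List (String × String))) : String :=
  if errors = [] then "none"
  else
    let m := errors.foldl (fun m e => max m (pvRank (pvSev e))) 0
    ["low", "medium", "high", "critical"].getD m "low"

-- ===== PRECONDITION & SPEC =====
def Spec_calculate_error_severity_py (errors : List (List (String × String))) (out : String) : Prop := out = calculate_error_severity_py_alt errors
instance (errors : List (List (String × String))) (out : String) : Decidable (Spec_calculate_error_severity_py errors out) := by unfold Spec_calculate_error_severity_py; infer_instance

-- ===== CLAIM (what is proved, stated in full; the proofs are below) =====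
def Claim_equal_calculate_error_severity_py : Prop := ∀ (errors : List (List (String × String))), Dom_calculate_error_severity_py errors → Spec_calculate_error_severity_py errors (calculate_error_severity_py errors)

-- ===== LEMMAS AND PROOFS =====

theorem pvRank_eq (x : String) :
    pvRank x = if x = "critical" then 3 else if x = "high" then 2 else if x = "medium" then 1 else 0 := by
  rw [pvRank, PySem.Dict.getD_eq_get?_getD, PySem.Dict.get?_mk_cons, PySem.Dict.get?_mk_cons,
    PySem.Dict.get?_mk_cons]
  simp only [beq_iff_eq, eq_comm (b := x)]
  split_ifs <;> simp [PySem.Dict.get?]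

theorem pvRank_le (x : String) : pvRank x ≤ 3 := by
  rw [pvRank_eq]; split_ifs <;> omega

theorem pvFold_comm (s : List String) (acc : Nat) :
    s.foldl (fun m x => max m (pvRank x)) acc = max acc (s.foldl (fun m x => max m (pvRank x)) 0) := by
  induction s generalizing acc with
  | nil => simp
  | cons y t ih =>
    simp only [List.foldl_cons]
    rw [ih, ih (max 0 (pvRank y))]
    omega

theorem pvFold_le (s : List String) : s.foldl (fun m x => max m (pvRank x)) 0 ≤ 3 := by
  induction s with
  | nil => simp
  | cons y t ih =>
    simp only [List.foldl_cons]
    rw [pvFold_comm]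
    have := pvRank_le y
    omega

theorem pvFold_ge_iff (s : List String) (k : Nat) (hk : 1 ≤ k) :
    k ≤ s.foldl (fun m x => max m (pvRank x)) 0 ↔ ∃ x ∈ s, k ≤ pvRank x := by
  induction s with
  | nil => simp; omega
  | cons y t ih =>
    simp only [List.foldl_cons, List.mem_cons]
    rw [pvFold_comm]
    constructor
    · intro h
      rcases le_max_iff.mp h with h | h
      · exact ⟨y, Or.inl rfl, by omega⟩
      · obtain ⟨x, hx, hr⟩ := ih.mp h
        exact ⟨x, Or.inr hx, hr⟩
    · rintro ⟨x, hx | hx, hr⟩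
      · subst hx; omega
      · have := ih.mpr ⟨x, hx, hr⟩; omega

theorem pvKey (s : List String) :
    (if s.contains "critical" then "critical"
     else if s.contains "high" then "high"
     else if s.contains "medium" then "medium"
     else "low")
    = ["low", "medium", "high", "critical"].getD (s.foldl (fun m x => max m (pvRank x)) 0) "low" := by
  have hle := pvFold_le s
  by_cases h3 : "critical" ∈ s
  · have : 3 ≤ s.foldl (fun m x => max m (pvRank x)) 0 :=
      (pvFold_ge_iff s 3 (by omega)).mpr ⟨"critical", h3, by rw [pvRank_eq]; simp⟩
    have hf : s.foldl (fun m x => max m (pvRank x)) 0 = 3 := by omega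
    simp [h3, hf]
  · have hne3 : ¬ 3 ≤ s.foldl (fun m x => max m (pvRank x)) 0 := by
      intro h
      obtain ⟨x, hx, hr⟩ := (pvFold_ge_iff s 3 (by omega)).mp h
      rw [pvRank_eq] at hr
      split_ifs at hr with a b c <;> first | (subst a; exact h3 hx) | omega
    by_cases h2 : "high" ∈ s
    · have : 2 ≤ s.foldl (fun m x => max m (pvRank x)) 0 :=
        (pvFold_ge_iff s 2 (by omega)).mpr ⟨"high", h2, by rw [pvRank_eq]; simp⟩
      have hf : s.foldl (fun m x => max m (pvRank x)) 0 = 2 := by omega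
      simp [h3, h2, hf]
    · have hne2 : ¬ 2 ≤ s.foldl (fun m x => max m (pvRank x)) 0 := by
        intro h
        obtain ⟨x, hx, hr⟩ := (pvFold_ge_iff s 2 (by omega)).mp h
        rw [pvRank_eq] at hr
        split_ifs at hr with a b c <;>
          first | (subst a; exact h3 hx) | (subst b; exact h2 hx) | omega
      by_cases h1 : "medium" ∈ s
      · have : 1 ≤ s.foldl (fun m x => max m (pvRank x)) 0 :=
          (pvFold_ge_iff s 1 (by omega)).mpr ⟨"medium", h1, by rw [pvRank_eq]; simp⟩
        have hf : s.foldl (fun m x => max m (pvRank x)) 0 = 1 := by omega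
        simp [h3, h2, h1, hf]
      · have hne1 : ¬ 1 ≤ s.foldl (fun m x => max m (pvRank x)) 0 := by
          intro h
          obtain ⟨x, hx, hr⟩ := (pvFold_ge_iff s 1 (by omega)).mp h
          rw [pvRank_eq] at hr
          split_ifs at hr with a b c <;>
            first | (subst a; exact h3 hx) | (subst b; exact h2 hx) | (subst c; exact h1 hx) | omega
        have hf : s.foldl (fun m x => max m (pvRank x)) 0 = 0 := by omega
        simp [h3, h2, h1, hf]

-- ===== VERDICT (by name: the statement is the Claim_ definition above) =====
theorem calculate_error_severity_py_spec : Claim_equal_calculate_error_severity_py := by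
  intro errors _
  unfold Spec_calculate_error_severity_py calculate_error_severity_py calculate_error_severity_py_alt
  by_cases h : errors = []
  · simp [h]
  · simp only [h, if_false]
    rw [show errors.foldl (fun m e => max m (pvRank (pvSev e))) 0
          = (errors.map (fun e => pvSev e)).foldl (fun m x => max m (pvRank x)) 0 by
        rw [List.foldl_map]]
    exact pvKey (errors.map (fun e => pvSev e))
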